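-- pv_equiv track=rewrite | github.com/MohitJ2003/Django---Simple-Web-Tools | app1/mypythonpackage/audiototext.py | get_ep_nums
-- ===== SOURCE A (Python) =====
-- def get_ep_nums(file_name="default_name"):
--     numlist = []
--     num = ""
--     for a in file_name:
--         if a.isnumeric():
--             if len(num) < 3:
--                 num += a
--                 if len(num) == 3:
--                     numlist.append(num)
--                     num = ""
--
--     epnumlist = sorted(list(set(numlist)))
--     return epnumlist
-- ===== SOURCE B (Python) =====
-- def get_ep_nums(file_name="default_name"):
--     digits = [c for c in file_name if c.isnumeric()]
--     chunks = ["".join(digits[3 * i:3 * i + 3]) for i in range(len(digits) // 3)]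
--     return sorted(set(chunks))
-- ===== Notes on version B (the rewrite author's own statement) =====
-- stated objective: simpler
-- what changed: Replaces A's single-pass running 3-char buffer with a collect-then-slice decomposition: filter out all numeric characters first, then take the full 3-digit chunks by index slicing and return sorted(set(chunks)).
import Mathlib
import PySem

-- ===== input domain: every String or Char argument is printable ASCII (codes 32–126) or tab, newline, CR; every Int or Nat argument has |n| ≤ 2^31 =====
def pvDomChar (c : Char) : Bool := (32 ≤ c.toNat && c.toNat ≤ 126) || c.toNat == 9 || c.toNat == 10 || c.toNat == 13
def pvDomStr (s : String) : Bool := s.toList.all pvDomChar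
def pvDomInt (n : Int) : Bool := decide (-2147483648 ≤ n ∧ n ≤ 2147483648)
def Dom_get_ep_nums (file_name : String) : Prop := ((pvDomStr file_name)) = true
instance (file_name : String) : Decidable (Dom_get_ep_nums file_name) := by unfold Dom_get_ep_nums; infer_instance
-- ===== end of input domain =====

-- B replaces A's running 3-char buffer with filter-then-slice over the digit string (objective: simpler).


-- ===== PORT A =====
-- Python's c.isnumeric() equals PySem.Chars.isdigit on the printable-ASCII domain Dom_ (exact there).
-- loop body of A: state = (numlist, num)
def pvStepA (st : List String × List Char) (a : Char) : List String × List Char :=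
  if PySem.Chars.isdigit a then
    if st.2.length < 3 then
      let num := st.2 ++ [a]
      if num.length = 3 then (st.1 ++ [String.ofList num], []) else (st.1, num)
    else st
  else st

def get_ep_nums (file_name : String) : List String :=
  PySem.List.sorted (PySem.Set.ofList (file_name.toList.foldl pvStepA ([], [])).1)
    (fun x => x) false

-- ===== PORT B =====
-- chunks = ["".join(digits[3*i:3*i+3]) for i in range(len(digits)//3)]
def pvChunksB (digits : List Char) : List String :=
  (PySem.List.pyRange 0 (PySem.Int.floordiv (digits.length : Int) 3) 1).map
    (fun i => String.ofList (PySem.List.slice digits (some (3 * i)) (some (3 * i + 3))))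

def get_ep_nums_alt (file_name : String) : List String :=
  PySem.List.sorted
    (PySem.Set.ofList (pvChunksB (file_name.toList.filter PySem.Chars.isdigit)))
    (fun x => x) false

-- ===== PRECONDITION & SPEC =====
def Spec_get_ep_nums (file_name : String) (out : List String) : Prop := out = get_ep_nums_alt file_name
instance (file_name : String) (out : List String) : Decidable (Spec_get_ep_nums file_name out) := by unfold Spec_get_ep_nums; infer_instance

-- ===== CLAIM (what is proved, stated in full; the proofs are below) =====
def Claim_equal_get_ep_nums : Prop := ∀ (file_name : String), Dom_get_ep_nums file_name → Spec_get_ep_nums file_name (get_ep_nums file_name)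

-- ===== LEMMAS AND PROOFS =====

-- canonical grouping of a digit list into full triples (proof-only helper)
def pvChunk3 : List Char → List String
  | a :: b :: c :: rest => String.ofList [a, b, c] :: pvChunk3 rest
  | _ => []

theorem pvChunk3_short (cs : List Char) (h : cs.length < 3) : pvChunk3 cs = [] := by
  match cs with
  | [] => rfl
  | [_] => rfl
  | [_, _] => rfl
  | _ :: _ :: _ :: _ => simp at h; omega

-- A's fold computes acc ++ pvChunk3 (buffer ++ digits of the rest)
theorem pvFoldA (cs : List Char) : ∀ (nl : List String) (num : List Char), num.length < 3 →
    (cs.foldl pvStepA (nl, num)).1 = nl ++ pvChunk3 (num ++ cs.filter PySem.Chars.isdigit) := by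
  induction cs with
  | nil => intro nl num h; simp [pvChunk3_short num h]
  | cons a cs ih =>
    intro nl num h
    rw [List.foldl_cons]
    by_cases hd : PySem.Chars.isdigit a
    · by_cases h3 : (num ++ [a]).length = 3
      · have hnum : ∃ u v, num = [u, v] := by
          match num with
          | [u, v] => exact ⟨u, v, rfl⟩
          | [] => simp at h3
          | [_] => simp at h3
          | _ :: _ :: _ :: _ => simp at h; omega
        obtain ⟨u, v, rfl⟩ := hnum
        have hstep : pvStepA (nl, [u, v]) a = (nl ++ [String.ofList [u, v, a]], []) := by
          simp [pvStepA, hd]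
        rw [hstep, ih _ [] (by simp)]
        simp [pvChunk3, hd]
      · have hstep : pvStepA (nl, num) a = (nl, num ++ [a]) := by
          simp [pvStepA, hd, h]
          intro hlen; exact absurd (by simpa using hlen) h3
        rw [hstep, ih nl (num ++ [a]) (by simp at h3 ⊢; omega)]
        simp [hd]
    · have hstep : pvStepA (nl, num) a = (nl, num) := by simp [pvStepA, hd]
      rw [hstep, ih nl num h]
      simp [hd]

-- Nat-level form of B's slicing
theorem pvSliceNat (ds : List Char) :
    (List.range (ds.length / 3)).map (fun k => String.ofList ((ds.drop (3 * k)).take 3))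
      = pvChunk3 ds := by
  match ds with
  | [] => rfl
  | [_] => simp [pvChunk3]
  | [_, _] => simp [pvChunk3]
  | a :: b :: c :: rest =>
    have hlen : (a :: b :: c :: rest).length / 3 = rest.length / 3 + 1 := by simp; omega
    rw [hlen, List.range_succ_eq_map, List.map_cons, List.map_map]
    have htail : ∀ k : Nat,
        ((a :: b :: c :: rest).drop (3 * (k + 1))).take 3 = (rest.drop (3 * k)).take 3 := by
      intro k
      have : 3 * (k + 1) = (3 * k) + 3 := by ring
      rw [this]
      rfl
    have : ((fun k => String.ofList (((a :: b :: c :: rest).drop (3 * k)).take 3)) ∘ (· + 1))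
        = fun k => String.ofList ((rest.drop (3 * k)).take 3) := by
      funext k; simp [htail k]
    rw [this, pvSliceNat rest, pvChunk3]
    rfl
termination_by ds.length

theorem pvChunksB_eq (ds : List Char) : pvChunksB ds = pvChunk3 ds := by
  unfold pvChunksB
  have hfd : PySem.Int.floordiv ((ds.length : Nat) : Int) 3 = ((ds.length / 3 : Nat) : Int) := by
    exact_mod_cast PySem.Int.floordiv_natCast ds.length 3
  rw [hfd, PySem.List.pyRange_one]
  have h0 : ((((ds.length / 3 : Nat) : Int)) - 0).toNat = ds.length / 3 := by omega
  rw [h0]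
  rw [List.map_map]
  have hfun : ((fun i => String.ofList (PySem.List.slice ds (some (3 * i)) (some (3 * i + 3))))
        ∘ (fun k : Nat => (0 : Int) + (k : Int)))
      = fun k : Nat => String.ofList ((ds.drop (3 * k)).take 3) := by
    funext k
    have e2 : (3 : Int) * ((0 : Int) + (k : Int)) = ((3 * k : Nat) : Int) := by push_cast; ring
    have e3 : ((3 * k : Nat) : Int) + 3 = ((3 * k + 3 : Nat) : Int) := by push_cast; ring
    simp only [Function.comp_apply]
    rw [e2, e3, PySem.List.slice_natCast]
    congr 2
    omega
  rw [hfun, pvSliceNat]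

-- ===== VERDICT (by name: the statement is the Claim_ definition above) =====
theorem get_ep_nums_spec : Claim_equal_get_ep_nums := by
  intro file_name _
  unfold Spec_get_ep_nums get_ep_nums get_ep_nums_alt
  rw [pvChunksB_eq, pvFoldA file_name.toList [] [] (by simp)]
  rfl
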